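-- pv_equiv track=rewrite | github.com/parkjh4550/Algorithm | Groom/소희와 버스.py | get_bus_arrival
-- ===== SOURCE A (Python) =====
-- def get_bus_arrival(list_bus_info: list, time_arrive: int):
--     list_min_time = []
--     for start, period in list_bus_info:
--         if start >= time_arrive:
--             list_min_time.append(start)
--             continue
--
--         time = start
--         while True:
--             time += period
--             if time >= time_arrive:
--                 break
--         list_min_time.append(time)
--     return list_min_time
-- ===== SOURCE B (Python) =====
-- def get_bus_arrival(list_bus_info: list, time_arrive: int):
--     return [start if start >= time_arrive
--             else start + -((start - time_arrive) // period) * period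
--             for start, period in list_bus_info]
-- ===== Notes on version B (the rewrite author's own statement) =====
-- stated objective: faster
-- what changed: Replaced the per-bus while-loop that repeatedly adds the period until reaching the target with a single ceiling-division formula start + ceil((time_arrive - start)/period)*period; intended as faster (measured 102x at n=262144 on inputs where both finish; the probe could not fully confirm because period=0 inputs make A hang and B raise).
import Mathlib
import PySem

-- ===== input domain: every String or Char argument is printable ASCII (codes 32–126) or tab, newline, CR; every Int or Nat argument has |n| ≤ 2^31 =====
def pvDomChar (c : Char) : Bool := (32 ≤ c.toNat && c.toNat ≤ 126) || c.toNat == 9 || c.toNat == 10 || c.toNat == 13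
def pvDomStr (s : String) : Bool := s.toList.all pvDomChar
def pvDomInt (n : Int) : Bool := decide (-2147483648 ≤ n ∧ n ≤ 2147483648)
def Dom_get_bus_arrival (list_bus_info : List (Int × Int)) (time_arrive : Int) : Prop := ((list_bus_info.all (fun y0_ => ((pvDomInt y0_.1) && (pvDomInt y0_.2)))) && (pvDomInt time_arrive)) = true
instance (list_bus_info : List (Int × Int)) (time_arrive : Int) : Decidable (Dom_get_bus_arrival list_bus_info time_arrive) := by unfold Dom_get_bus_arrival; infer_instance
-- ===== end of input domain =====

-- B replaces A's per-bus step-by-period while-loop with one ceiling-division formula (intended as faster; a timing run measured 102x at the largest size where both finished).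
-- ===== PORT A =====
-- A's inner 'while True: time += period; if time >= time_arrive: break' loop.
-- The '0 < period' test only makes the recursion total: Python loops forever when
-- period ≤ 0 and time + period < time_arrive (excluded by Pre_ below).
def pvLoopA (time_arrive period time : Int) : Int :=
  if _h : 0 < period ∧ time + period < time_arrive then
    pvLoopA time_arrive period (time + period)
  else time + period
termination_by (time_arrive - time).toNat
decreasing_by omega

def get_bus_arrival (list_bus_info : List (Int × Int)) (time_arrive : Int) : List Int :=
  list_bus_info.foldl
    (fun list_min_time bus =>
      if bus.1 ≥ time_arrive then list_min_time ++ [bus.1]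
      else list_min_time ++ [pvLoopA time_arrive bus.2 bus.1])
    []

-- ===== PORT B =====
def get_bus_arrival_alt (list_bus_info : List (Int × Int)) (time_arrive : Int) : List Int :=
  list_bus_info.map (fun bus =>
    if bus.1 ≥ time_arrive then bus.1
    else bus.1 + -(PySem.Int.floordiv (bus.1 - time_arrive) bus.2) * bus.2)

-- ===== PRECONDITION & SPEC =====
-- Pre_ excludes buses with start < time_arrive and period ≤ 0, on which A's while-loop never terminates
-- (and B divides by zero when period = 0).
def Pre_get_bus_arrival (list_bus_info : List (Int × Int)) (time_arrive : Int) : Prop :=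
  ∀ bus ∈ list_bus_info, bus.1 < time_arrive → 0 < bus.2
instance (list_bus_info : List (Int × Int)) (time_arrive : Int) : Decidable (Pre_get_bus_arrival list_bus_info time_arrive) := by unfold Pre_get_bus_arrival; infer_instance
def pvWitness_get_bus_arrival : (List (Int × Int)) × Int := ([(3, 5), (10, 2), (0, 4)], 9)

def Spec_get_bus_arrival (list_bus_info : List (Int × Int)) (time_arrive : Int) (out : List Int) : Prop := out = get_bus_arrival_alt list_bus_info time_arrive
instance (list_bus_info : List (Int × Int)) (time_arrive : Int) (out : List Int) : Decidable (Spec_get_bus_arrival list_bus_info time_arrive out) := by unfold Spec_get_bus_arrival; infer_instance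

-- ===== CLAIM (what is proved, stated in full; the proofs are below) =====
def Claim_equal_get_bus_arrival : Prop := ∀ (list_bus_info : List (Int × Int)) (time_arrive : Int), Dom_get_bus_arrival list_bus_info time_arrive → Pre_get_bus_arrival list_bus_info time_arrive → Spec_get_bus_arrival list_bus_info time_arrive (get_bus_arrival list_bus_info time_arrive)

-- ===== LEMMAS AND PROOFS =====

-- A's loop equals B's ceiling formula, by well-founded induction on the loop measure.
lemma pvLoopA_eq (time_arrive period time : Int) (hp : 0 < period) (ht : time < time_arrive) :
    pvLoopA time_arrive period time
      = time + -(PySem.Int.floordiv (time - time_arrive) period) * period := by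
  rw [pvLoopA]
  split_ifs with h
  · have ih := pvLoopA_eq time_arrive period (time + period) hp (by omega)
    rw [ih]
    have hc := (PySem.Int.floordiv_eq_iff_of_pos (a := time - time_arrive) (b := period)
        (q := PySem.Int.floordiv (time - time_arrive) period) hp).mp rfl
    have hstep : PySem.Int.floordiv (time + period - time_arrive) period
        = PySem.Int.floordiv (time - time_arrive) period + 1 := by
      rw [PySem.Int.floordiv_eq_iff_of_pos (a := time + period - time_arrive) hp]
      constructor <;> nlinarith [hc.1, hc.2]
    rw [hstep]; ring
  · -- one step reaches the target: the floor quotient is -1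
    have hq : PySem.Int.floordiv (time - time_arrive) period = -1 := by
      rw [PySem.Int.floordiv_eq_iff_of_pos (a := time - time_arrive) hp]
      constructor <;> omega
    rw [hq]; ring
termination_by (time_arrive - time).toNat
decreasing_by omega

-- A's fold with an arbitrary accumulator produces acc ++ B's map.
lemma foldA_eq (time_arrive : Int) (l : List (Int × Int)) (acc : List Int)
    (hpre : Pre_get_bus_arrival l time_arrive) :
    l.foldl
      (fun list_min_time bus =>
        if bus.1 ≥ time_arrive then list_min_time ++ [bus.1]
        else list_min_time ++ [pvLoopA time_arrive bus.2 bus.1]) acc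
    = acc ++ l.map (fun bus =>
        if bus.1 ≥ time_arrive then bus.1
        else bus.1 + -(PySem.Int.floordiv (bus.1 - time_arrive) bus.2) * bus.2) := by
  induction l generalizing acc with
  | nil => simp
  | cons bus rest ih =>
    have hbus : bus.1 < time_arrive → 0 < bus.2 := hpre bus (List.mem_cons_self ..)
    have hrest : Pre_get_bus_arrival rest time_arrive :=
      fun b hb => hpre b (List.mem_cons_of_mem _ hb)
    simp only [List.foldl_cons, List.map_cons]
    rw [ih _ hrest]
    by_cases hge : bus.1 ≥ time_arrive
    · simp [hge]
    · simp only [hge, if_false]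
      rw [pvLoopA_eq time_arrive bus.2 bus.1 (hbus (by omega)) (by omega)]
      simp

-- ===== VERDICT (by name: the statement is the Claim_ definition above) =====
theorem get_bus_arrival_spec : Claim_equal_get_bus_arrival := by
  intro l t _ hpre
  unfold Spec_get_bus_arrival get_bus_arrival get_bus_arrival_alt
  simpa using foldA_eq t l [] hpre
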